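-- pv_equiv track=rewrite | github.com/i5K-KINBRE-script-share/read-cleaning-format-conversion | KSU_bioinfo_lab/fasta-o-matic/fasta_o_matic.py | compare_lengths
-- ===== SOURCE A (Python) =====
-- def compare_lengths(lengths):
--     '''
--     Compare length of >= 2 lines
--     '''
--     assert len(lengths) > 2, "I need at least two full-length lines to compare"
--     wrap_length = lengths[0]
--     lengths.pop()
--
--     for seq_line in lengths:
--         if seq_line != wrap_length:
--             return(False)
--     return(True)
-- ===== SOURCE B (Python) =====
-- def compare_lengths(lengths):
--     '''
--     Compare length of >= 2 lines
--     '''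
--     assert len(lengths) > 2, "I need at least two full-length lines to compare"
--     lengths.pop()
--     return min(lengths) == max(lengths)
-- ===== Notes on version B (the rewrite author's own statement) =====
-- stated objective: alternative
-- what changed: Replaces the pivot-against-first early-exit equality scan with two extremal aggregations: after the same pop(), B computes min and max of the remaining list and returns whether they coincide (all values equal iff min == max); the assert and the pop() mutation are preserved.
import Mathlib
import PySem

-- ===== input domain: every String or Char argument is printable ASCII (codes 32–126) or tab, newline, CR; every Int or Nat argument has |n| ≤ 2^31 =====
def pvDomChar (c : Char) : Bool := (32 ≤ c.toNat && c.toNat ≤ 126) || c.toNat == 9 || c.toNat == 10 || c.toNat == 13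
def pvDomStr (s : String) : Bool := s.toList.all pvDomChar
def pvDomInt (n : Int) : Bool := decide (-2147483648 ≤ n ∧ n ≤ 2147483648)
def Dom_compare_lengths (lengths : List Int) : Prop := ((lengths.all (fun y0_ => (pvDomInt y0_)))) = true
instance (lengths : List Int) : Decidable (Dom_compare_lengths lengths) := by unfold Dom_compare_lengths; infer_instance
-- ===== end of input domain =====

-- B replaces A's pivot-vs-first early-exit scan: after the same pop of the last element, B returns
-- whether min and max of the remaining values coincide (alternative aggregation, same cost). In
-- Python both mutate the argument identically (pop); the equivalence proved is about the return value.


-- ===== PORT A =====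
-- the for-loop with early return False
def goA (wrap : Int) : List Int → Bool
  | [] => true
  | x :: xs => if x ≠ wrap then false else goA wrap xs

def compare_lengths (lengths : List Int) : Bool :=
  -- assert len(lengths) > 2 raises for shorter lists: excluded by Pre_
  match PySem.List.pyGet? lengths 0, PySem.List.pop? lengths (-1) with
  | some wrap, some (_, rest) => goA wrap rest
  | _, _ => false

-- ===== PORT B =====
def compare_lengths_alt (lengths : List Int) : Bool :=
  -- assert len(lengths) > 2 raises for shorter lists: excluded by Pre_
  match PySem.List.pop? lengths (-1) with
  | none => false
  | some (_, rest) =>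
    match PySem.List.min? rest (fun y => y) with
    | none => false
    | some m =>
      match PySem.List.max? rest (fun y => y) with
      | none => false
      | some M => m == M

-- ===== PRECONDITION & SPEC =====
-- Pre_ excludes exactly the lists of length ≤ 2, on which A's assert raises AssertionError.
def Pre_compare_lengths (lengths : List Int) : Prop := 2 < lengths.length
instance (lengths : List Int) : Decidable (Pre_compare_lengths lengths) := by unfold Pre_compare_lengths; infer_instance
def pvWitness_compare_lengths : List Int := [5, 5, 5]
def Spec_compare_lengths (lengths : List Int) (out : Bool) : Prop := out = compare_lengths_alt lengths
instance (lengths : List Int) (out : Bool) : Decidable (Spec_compare_lengths lengths out) := by unfold Spec_compare_lengths; infer_instance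

-- ===== CLAIM (what is proved, stated in full; the proofs are below) =====
def Claim_equal_compare_lengths : Prop := ∀ (lengths : List Int), Dom_compare_lengths lengths → Pre_compare_lengths lengths → Spec_compare_lengths lengths (compare_lengths lengths)

-- ===== LEMMAS AND PROOFS =====

theorem goA_eq_all (w : Int) (l : List Int) : goA w l = l.all (fun y => y == w) := by
  induction l with
  | nil => rfl
  | cons x xs ih =>
    simp only [goA, List.all_cons, ih]
    by_cases h : x = w <;> simp [h]

theorem compare_lengths_spec : Claim_equal_compare_lengths := by
  intro lengths _ hpre
  unfold Pre_compare_lengths at hpre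
  unfold Spec_compare_lengths compare_lengths compare_lengths_alt
  rcases List.eq_nil_or_concat lengths with rfl | ⟨init, z, rfl⟩
  · simp at hpre
  · rw [List.concat_eq_append] at *
    rw [PySem.List.pop?_last init z]
    cases init with
    | nil => simp at hpre
    | cons x xs =>
      have hget : PySem.List.pyGet? ((x :: xs) ++ [z]) 0 = some x := by simp
      rw [hget]
      obtain ⟨m, hm⟩ : ∃ m, PySem.List.min? (x :: xs) (fun y => y) = some m := by
        cases h : PySem.List.min? (x :: xs) (fun y => y) with
        | none => exact absurd ((PySem.List.min?_eq_none_iff _ _).mp h) (by simp)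
        | some m => exact ⟨m, rfl⟩
      obtain ⟨M, hM⟩ : ∃ M, PySem.List.max? (x :: xs) (fun y => y) = some M := by
        cases h : PySem.List.max? (x :: xs) (fun y => y) with
        | none => exact absurd ((PySem.List.max?_eq_none_iff _ _).mp h) (by simp)
        | some M => exact ⟨M, rfl⟩
      show goA x (x :: xs) =
        (match PySem.List.min? (x :: xs) (fun y => y) with
         | none => false
         | some m =>
           match PySem.List.max? (x :: xs) (fun y => y) with
           | none => false
           | some M => m == M)
      rw [hm, hM]
      show goA x (x :: xs) = (m == M)
      rw [goA_eq_all]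
      have hmMem := PySem.List.min?_mem hm
      have hMMem := PySem.List.max?_mem hM
      have hmMin := PySem.List.min?_isMin hm
      have hMMax := PySem.List.max?_isMax hM
      by_cases hEq : ∀ y ∈ x :: xs, y = x
      · have hmx : m = x := hEq m hmMem
        have hMx : M = x := hEq M hMMem
        have : (x :: xs).all (fun y => y == x) = true := by
          simp only [List.all_eq_true, beq_iff_eq]; exact fun y hy => hEq y hy
        simp [this, hmx, hMx]
      · obtain ⟨y, hy, hyx⟩ : ∃ y ∈ x :: xs, y ≠ x := by
          simpa using hEq
        have hall : (x :: xs).all (fun y => y == x) = false := by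
          simp only [List.all_eq_false]
          exact ⟨y, hy, by simp [hyx]⟩
        rw [hall, eq_comm]
        simp only [beq_eq_false_iff_ne, ne_eq]
        intro hmM
        -- if min = max, every element equals m; contradiction with y ≠ x
        have hyeq : y = m := le_antisymm (by simpa [hmM] using hMMax y hy) (hmMin y hy)
        have hxeq : x = m := le_antisymm (by simpa [hmM] using hMMax x (by simp)) (hmMin x (by simp))
        exact hyx (hyeq.trans hxeq.symm)
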